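-- pv_equiv track=rewrite | github.com/AdamJaworski/dtmf-unet-pytorch | model/test.py | advance_post_processing_logic_executor
-- ===== SOURCE A (Python) =====
-- def advance_post_processing_logic_executor(sequence: list) -> list:
--     """APPLE"""
--     output = []
--
--     previous_element         = None
--     previously_added_element = None
--     for index, element in enumerate(sequence):
--         if element == previous_element and element != previously_added_element:
--             output.append(element)
--             previously_added_element = element
--
--         previous_element = element
--
--     return output
-- ===== SOURCE B (Python) =====
-- def _runs(sequence):
--     runs = []
--     for x in sequence:
--         if runs and runs[-1][0] == x:
--             runs[-1][1] += 1
--         else: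
--             runs.append([x, 1])
--     return runs
--
--
-- def advance_post_processing_logic_executor(sequence: list) -> list:
--     """APPLE"""
--     vals = [v for v, c in _runs(sequence) if c >= 2]
--     out = []
--     for v in vals:
--         if not out or out[-1] != v:
--             out.append(v)
--     return out
-- ===== Notes on version B (the rewrite author's own statement) =====
-- stated objective: alternative
-- what changed: Replaces A's single stateful scan (previous/previously-added registers) by a three-stage pipeline: group the sequence into (value, run-length) runs, keep values of runs of length >= 2, then drop a value equal to the last one emitted.
import Mathlib
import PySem

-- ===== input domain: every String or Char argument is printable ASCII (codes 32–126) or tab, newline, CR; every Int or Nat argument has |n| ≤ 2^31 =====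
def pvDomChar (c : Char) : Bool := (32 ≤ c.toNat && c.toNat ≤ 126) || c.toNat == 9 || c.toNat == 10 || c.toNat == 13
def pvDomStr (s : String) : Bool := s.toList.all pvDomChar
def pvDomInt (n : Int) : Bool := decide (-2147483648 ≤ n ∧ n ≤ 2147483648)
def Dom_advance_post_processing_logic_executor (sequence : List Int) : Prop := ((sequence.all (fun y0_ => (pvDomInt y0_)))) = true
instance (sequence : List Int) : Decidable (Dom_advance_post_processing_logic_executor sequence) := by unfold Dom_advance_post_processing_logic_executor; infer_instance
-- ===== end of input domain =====

-- B replaces A's single stateful scan by a runs → filter(length ≥ 2) → adjacent-dedup pipeline (alternative decomposition, same cost).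

-- ===== PORT A =====
-- state = (output, previous_element, previously_added_element); None ↦ none
def advance_post_processing_logic_executor (sequence : List Int) : List Int :=
  (sequence.foldl
    (fun (st : List Int × Option Int × Option Int) element =>
      if some element = st.2.1 ∧ some element ≠ st.2.2 then
        (st.1 ++ [element], some element, some element)
      else
        (st.1, some element, st.2.2))
    ([], none, none)).1

-- ===== PORT B =====
-- _runs: fold building (value, count) runs; runs[-1] ↦ getLast?, in-place count bump ↦ dropLast ++ [(v, c+1)]
def pvRunsB (sequence : List Int) : List (Int × Int) :=
  sequence.foldl
    (fun runs x =>
      match runs.getLast? with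
      | some vc => if vc.1 = x then runs.dropLast ++ [(vc.1, vc.2 + 1)] else runs ++ [(x, 1)]
      | none => [(x, 1)])
    []

def advance_post_processing_logic_executor_alt (sequence : List Int) : List Int :=
  let vals := (pvRunsB sequence).foldl (fun acc vc => if 2 ≤ vc.2 then acc ++ [vc.1] else acc) []
  vals.foldl (fun out v => if out.getLast? ≠ some v then out ++ [v] else out) []

-- ===== PRECONDITION & SPEC =====
def Spec_advance_post_processing_logic_executor (sequence : List Int) (out : List Int) : Prop := out = advance_post_processing_logic_executor_alt sequence
instance (sequence : List Int) (out : List Int) : Decidable (Spec_advance_post_processing_logic_executor sequence out) := by unfold Spec_advance_post_processing_logic_executor; infer_instance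

-- ===== CLAIM (what is proved, stated in full; the proofs are below) =====
def Claim_equal_advance_post_processing_logic_executor : Prop := ∀ (sequence : List Int), Dom_advance_post_processing_logic_executor sequence → Spec_advance_post_processing_logic_executor sequence (advance_post_processing_logic_executor sequence)

-- ===== LEMMAS AND PROOFS =====

def pvAStep (st : List Int × Option Int × Option Int) (element : Int) : List Int × Option Int × Option Int :=
  if some element = st.2.1 ∧ some element ≠ st.2.2 then
    (st.1 ++ [element], some element, some element)
  else
    (st.1, some element, st.2.2)

def pvVals (r : List (Int × Int)) : List Int :=
  r.foldl (fun acc vc => if 2 ≤ vc.2 then acc ++ [vc.1] else acc) []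

def pvDedup (l : List Int) : List Int :=
  l.foldl (fun out v => if out.getLast? ≠ some v then out ++ [v] else out) []

lemma pvA_eq (l : List Int) :
    advance_post_processing_logic_executor l = (l.foldl pvAStep ([], none, none)).1 := rfl

lemma pvAlt_eq (l : List Int) :
    advance_post_processing_logic_executor_alt l = pvDedup (pvVals (pvRunsB l)) := rfl

lemma pvVals_concat (r : List (Int × Int)) (a : Int × Int) :
    pvVals (r ++ [a]) = if 2 ≤ a.2 then pvVals r ++ [a.1] else pvVals r := by
  simp [pvVals, List.foldl_append]

lemma pvDedup_concat (l : List Int) (v : Int) :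
    pvDedup (l ++ [v]) = if (pvDedup l).getLast? ≠ some v then pvDedup l ++ [v] else pvDedup l := by
  simp [pvDedup, List.foldl_append]

lemma pvDedup_last (l : List Int) (v : Int) :
    (pvDedup (l ++ [v])).getLast? = some v := by
  rw [pvDedup_concat]
  split_ifs with h
  · simp
  · simpa using h

-- Loop invariant: A's output is dedup(vals(runs)), its previous-register is the last run's
-- value, its previously-added register is the last element of its output; run counts are ≥ 1.
lemma pvInv (l : List Int) :
    (l.foldl pvAStep ([], none, none)).1 = pvDedup (pvVals (pvRunsB l))
  ∧ (l.foldl pvAStep ([], none, none)).2.1 = ((pvRunsB l).getLast?).map Prod.fst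
  ∧ (l.foldl pvAStep ([], none, none)).2.2 = (l.foldl pvAStep ([], none, none)).1.getLast?
  ∧ ∀ vc ∈ pvRunsB l, 1 ≤ vc.2 := by
  induction l using List.reverseRecOn with
  | nil => simp [pvRunsB, pvVals, pvDedup]
  | append_singleton l x ih =>
    obtain ⟨h1, h2, h3, h4⟩ := ih
    have hr : pvRunsB (l ++ [x]) =
        (match (pvRunsB l).getLast? with
         | some vc => if vc.1 = x then (pvRunsB l).dropLast ++ [(vc.1, vc.2 + 1)] else pvRunsB l ++ [(x, 1)]
         | none => [(x, 1)]) := by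
      simp [pvRunsB, List.foldl_append]
    have ha : (l ++ [x]).foldl pvAStep ([], none, none) = pvAStep (l.foldl pvAStep ([], none, none)) x :=
      List.foldl_append ..
    rcases hlast : (pvRunsB l).getLast? with _ | ⟨v, c⟩
    · -- runs empty: pvRunsB l = []
      have hnil : pvRunsB l = [] := List.getLast?_eq_none_iff.mp hlast
      rw [hlast] at hr
      have hcond : ¬ (some x = (l.foldl pvAStep ([], none, none)).2.1
          ∧ some x ≠ (l.foldl pvAStep ([], none, none)).2.2) := by
        rw [h2, hlast]; simp
      rw [ha, pvAStep, if_neg hcond, hr]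
      refine ⟨?_, by simp, ?_, ?_⟩
      · rw [h1, hnil]; simp [pvVals, pvDedup]
      · rw [h3]
      · intro vc hvc; simp only [List.mem_singleton] at hvc; subst hvc; norm_num
    · obtain ⟨r₀, hr₀⟩ := List.getLast?_eq_some_iff.mp hlast
      have hdrop : (pvRunsB l).dropLast = r₀ := by rw [hr₀]; simp
      have hc1 : 1 ≤ c := h4 (v, c) (by rw [hr₀]; simp)
      rw [hlast] at hr
      by_cases hvx : v = x
      · -- same value: count bump
        simp only [if_pos hvx, hdrop] at hr
        have hvals' : pvVals (pvRunsB (l ++ [x])) = pvVals r₀ ++ [v] := by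
          rw [hr, pvVals_concat]; simp [show (2:Int) ≤ c + 1 by omega]
        have hmem : ∀ vc ∈ pvRunsB (l ++ [x]), 1 ≤ vc.2 := by
          intro vc hvc; rw [hr] at hvc
          rcases List.mem_append.mp hvc with h | h
          · exact h4 vc (by rw [hr₀]; exact List.mem_append.mpr (Or.inl h))
          · simp only [List.mem_singleton] at h; subst h; simp; omega
        by_cases hc2 : 2 ≤ c
        · -- run already long enough: nothing changes; A's pa is already v
          have hvl : pvVals (pvRunsB l) = pvVals r₀ ++ [v] := by
            rw [hr₀, pvVals_concat]; simp [hc2]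
          have hpa : (l.foldl pvAStep ([], none, none)).2.2 = some v := by
            rw [h3, h1, hvl, pvDedup_last]
          have hcond : ¬ (some x = (l.foldl pvAStep ([], none, none)).2.1
              ∧ some x ≠ (l.foldl pvAStep ([], none, none)).2.2) := by
            rw [h2, hlast, hpa]; simp [hvx]
          rw [ha, pvAStep, if_neg hcond]
          refine ⟨?_, ?_, h3, hmem⟩
          · rw [h1, hvl, hvals']
          · rw [hr]; simp [hvx]
        · -- c = 1: the run becomes long enough now
          have hceq : c = 1 := by omega
          have hvl : pvVals (pvRunsB l) = pvVals r₀ := by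
            rw [hr₀, pvVals_concat]; simp [hceq]
          by_cases hpa : (l.foldl pvAStep ([], none, none)).2.2 = some v
          · have hcond : ¬ (some x = (l.foldl pvAStep ([], none, none)).2.1
                ∧ some x ≠ (l.foldl pvAStep ([], none, none)).2.2) := by
              rw [h2, hlast, hpa]; simp [hvx]
            rw [ha, pvAStep, if_neg hcond]
            refine ⟨?_, ?_, h3, hmem⟩
            · rw [h1, hvl, hvals', pvDedup_concat, if_neg]
              simp only [ne_eq, not_not]
              rw [← hvl, ← h1, ← h3]; exact hpa
            · rw [hr]; simp [hvx]
          · have hcond : (some x = (l.foldl pvAStep ([], none, none)).2.1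
                ∧ some x ≠ (l.foldl pvAStep ([], none, none)).2.2) := by
              rw [h2, hlast]
              exact ⟨by simp [hvx], by rw [← hvx]; simpa using fun h => hpa h.symm⟩
            rw [ha, pvAStep, if_pos hcond]
            refine ⟨?_, ?_, ?_, hmem⟩
            · rw [hvals', pvDedup_concat, if_pos, h1, hvl, hvx]
              simp only [ne_eq]
              rw [← hvl, ← h1, ← h3]; exact hpa
            · rw [hr]; simp [hvx]
            · simp
      · -- new run starts
        simp only [if_neg hvx] at hr
        have hvl : pvVals (pvRunsB (l ++ [x])) = pvVals (pvRunsB l) := by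
          rw [hr, pvVals_concat]; simp
        have hcond : ¬ (some x = (l.foldl pvAStep ([], none, none)).2.1
            ∧ some x ≠ (l.foldl pvAStep ([], none, none)).2.2) := by
          rw [h2, hlast]; simp; intro h; exact absurd h.symm hvx
        rw [ha, pvAStep, if_neg hcond]
        refine ⟨by rw [h1, hvl], by rw [hr]; simp, h3, ?_⟩
        intro vc hvc; rw [hr] at hvc
        rcases List.mem_append.mp hvc with h | h
        · exact h4 vc h
        · simp only [List.mem_singleton] at h; subst h; norm_num

-- ===== VERDICT (by name: the statement is the Claim_ definition above) =====
theorem advance_post_processing_logic_executor_spec : Claim_equal_advance_post_processing_logic_executor := by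
  intro sequence _
  unfold Spec_advance_post_processing_logic_executor
  rw [pvA_eq, pvAlt_eq]
  exact (pvInv sequence).1
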